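-- pv_equiv track=rewrite | github.com/craigrallen/ha-habitus | habitus/habitus/automation_gap.py | _extract_entities_from_text
-- ===== SOURCE A (Python) =====
-- def _extract_entities_from_text(text, known_entity_ids):
--     """Extract entity IDs mentioned (by name fragments) in suggestion text."""
--     lower = text.lower()
--     matches = []
--     for eid in known_entity_ids:
--         parts = eid.split(".", 1)
--         if len(parts) < 2:
--             continue
--         domain, name = parts
--         friendly = name.replace("_", " ")
--         if friendly in lower or name in lower.replace(" ", "_"):
--             matches.append(eid)
--     return matches
-- ===== SOURCE B (Python) =====
-- def _extract_entities_from_text(text, known_entity_ids):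
--     """Index-based variant: instead of scanning the text once per entity id,
--     build (once) the set of all substrings of the relevant lengths of the
--     lowered text and of its space->underscore form; each candidate id is then
--     decided by two set lookups."""
--     lower = text.lower()
--     und = lower.replace(" ", "_")
--     cands = []
--     for eid in known_entity_ids:
--         parts = eid.split(".", 1)
--         if len(parts) == 2:
--             name = parts[1]
--             cands.append((eid, name.replace("_", " "), name))
--
--     def substrings(s, lengths):
--         return {s[i:i + l] for l in lengths for i in range(len(s) - l + 1)}
--
--     subs_l = substrings(lower, {len(f) for _, f, _ in cands})
--     subs_u = substrings(und, {len(n) for _, _, n in cands})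
--     return [eid for eid, f, n in cands if f in subs_l or n in subs_u]
-- ===== Notes on version B (the rewrite author's own statement) =====
-- stated objective: alternative
-- what changed: A scans the text once per entity id with two substring searches (recomputing the underscored text each time); B parses the ids into candidate fragment records, builds once the set of all substrings of the relevant fragment lengths of the lowered text and of its space-to-underscore form, and then decides each candidate by two set lookups.
import Mathlib
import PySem

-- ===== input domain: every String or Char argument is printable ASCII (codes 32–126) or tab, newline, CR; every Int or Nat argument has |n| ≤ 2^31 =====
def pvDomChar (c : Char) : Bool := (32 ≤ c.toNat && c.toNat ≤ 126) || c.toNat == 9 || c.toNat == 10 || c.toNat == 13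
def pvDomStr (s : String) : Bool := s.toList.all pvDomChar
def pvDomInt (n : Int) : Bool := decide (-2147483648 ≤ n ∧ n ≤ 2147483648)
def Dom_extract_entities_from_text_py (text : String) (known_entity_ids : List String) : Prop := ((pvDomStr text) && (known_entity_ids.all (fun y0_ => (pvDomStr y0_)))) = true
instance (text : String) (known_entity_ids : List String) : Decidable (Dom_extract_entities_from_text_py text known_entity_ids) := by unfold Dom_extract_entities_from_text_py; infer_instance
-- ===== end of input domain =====

-- B replaces A's per-id substring searches over the text by a substring index: the set of all
-- substrings of the relevant fragment lengths is built once from the lowered text and its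
-- space->underscore form, and each candidate id is then decided by two set lookups (alternative
-- decomposition; no speed claim).

-- ===== PORT A =====
def extract_entities_from_text_py (text : String) (known_entity_ids : List String) : List String :=
  let lower := PySem.Str.lower text
  known_entity_ids.foldl (fun ms eid =>
    match PySem.Str.splitMax? eid "." 1 with
    | none => ms  -- unreachable: the separator "." is non-empty
    | some parts =>
      if parts.length < 2 then ms
      else
        let name := parts.getD 1 ""
        let friendly := PySem.Str.replace name "_" " "
        if PySem.Str.isIn friendly lower || PySem.Str.isIn name (PySem.Str.replace lower " " "_")
        then ms ++ [eid] else ms) []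

-- ===== PORT B =====
-- Source B's local helper `substrings(s, lengths)`: the set comprehension is the fold of Set.add
-- over the two nested iterations (set iteration order only feeds Set.add, so membership is exact).
def pvSubstrings (s : String) (lens : PySem.Set Int) : PySem.Set String :=
  lens.foldl (fun acc l =>
    (PySem.List.pyRange 0 (PySem.Str.len s - l + 1) 1).foldl (fun acc i =>
      PySem.Set.add acc (PySem.Str.slice s (some i) (some (i + l)))) acc) PySem.Set.empty

def extract_entities_from_text_py_alt (text : String) (known_entity_ids : List String) : List String :=
  let lower := PySem.Str.lower text
  let und := PySem.Str.replace lower " " "_"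
  let cands : List (String × String × String) := known_entity_ids.foldl (fun acc eid =>
    match PySem.Str.splitMax? eid "." 1 with
    | none => acc  -- unreachable: the separator "." is non-empty
    | some parts =>
      if parts.length == 2 then
        acc ++ [(eid, PySem.Str.replace (parts.getD 1 "") "_" " ", parts.getD 1 "")]
      else acc) []
  let subsL := pvSubstrings lower (cands.foldl (fun s c => PySem.Set.add s (PySem.Str.len c.2.1)) PySem.Set.empty)
  let subsU := pvSubstrings und (cands.foldl (fun s c => PySem.Set.add s (PySem.Str.len c.2.2)) PySem.Set.empty)
  (cands.filter (fun c => subsL.contains c.2.1 || subsU.contains c.2.2)).map (·.1)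

-- ===== PRECONDITION & SPEC =====
def Spec_extract_entities_from_text_py (text : String) (known_entity_ids : List String) (out : List String) : Prop := out = extract_entities_from_text_py_alt text known_entity_ids
instance (text : String) (known_entity_ids : List String) (out : List String) : Decidable (Spec_extract_entities_from_text_py text known_entity_ids out) := by unfold Spec_extract_entities_from_text_py; infer_instance

-- ===== CLAIM =====
def Claim_equal_extract_entities_from_text_py : Prop := ∀ (text : String) (known_entity_ids : List String), Dom_extract_entities_from_text_py text known_entity_ids → Spec_extract_entities_from_text_py text known_entity_ids (extract_entities_from_text_py text known_entity_ids)

-- ===== LEMMAS AND PROOFS =====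

-- A's per-id decision, extracted as a predicate.
def pvKeep (lower und eid : String) : Bool :=
  match PySem.Str.splitMax? eid "." 1 with
  | none => false
  | some parts =>
    if parts.length < 2 then false
    else PySem.Str.isIn (PySem.Str.replace (parts.getD 1 "") "_" " ") lower
         || PySem.Str.isIn (parts.getD 1 "") und

-- B's candidate record for one id, as an Option.
def pvParse (eid : String) : Option (String × String × String) :=
  match PySem.Str.splitMax? eid "." 1 with
  | none => none
  | some parts =>
    if parts.length == 2 then
      some (eid, PySem.Str.replace (parts.getD 1 "") "_" " ", parts.getD 1 "")
    else none

lemma pvA_foldl (lower : String) (ids : List String) (acc : List String) :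
    ids.foldl (fun ms eid =>
      match PySem.Str.splitMax? eid "." 1 with
      | none => ms
      | some parts =>
        if parts.length < 2 then ms
        else
          let name := parts.getD 1 ""
          let friendly := PySem.Str.replace name "_" " "
          if PySem.Str.isIn friendly lower || PySem.Str.isIn name (PySem.Str.replace lower " " "_")
          then ms ++ [eid] else ms) acc
    = acc ++ ids.filter (pvKeep lower (PySem.Str.replace lower " " "_")) := by
  have hstep : (fun (ms : List String) (eid : String) =>
      match PySem.Str.splitMax? eid "." 1 with
      | none => ms
      | some parts =>
        if parts.length < 2 then ms
        else
          let name := parts.getD 1 ""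
          let friendly := PySem.Str.replace name "_" " "
          if PySem.Str.isIn friendly lower || PySem.Str.isIn name (PySem.Str.replace lower " " "_")
          then ms ++ [eid] else ms)
      = fun ms eid => if pvKeep lower (PySem.Str.replace lower " " "_") eid then ms ++ [id eid] else ms := by
    funext ms eid
    unfold pvKeep
    cases h : PySem.Str.splitMax? eid "." 1 with
    | none => simp
    | some parts =>
      simp only []
      split_ifs <;> simp_all
  rw [hstep, PySem.List.foldl_append_if, List.map_id]

lemma pvB_candidates (ids : List String) (acc : List (String × String × String)) :
    ids.foldl (fun acc eid =>
      match PySem.Str.splitMax? eid "." 1 with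
      | none => acc
      | some parts =>
        if parts.length == 2 then
          acc ++ [(eid, PySem.Str.replace (parts.getD 1 "") "_" " ", parts.getD 1 "")]
        else acc) acc
    = acc ++ ids.filterMap pvParse := by
  induction ids generalizing acc with
  | nil => simp
  | cons e t ih =>
    simp only [List.foldl_cons, List.filterMap_cons]
    rw [ih]
    unfold pvParse
    cases h : PySem.Str.splitMax? e "." 1 with
    | none => simp
    | some parts =>
      simp only []
      by_cases hl : (parts.length == 2) = true
      · simp [hl]
      · simp [hl]

-- a split with maxsplit 1 yields at most 2 parts
lemma pvGo_len (sep : List Char) : ∀ (fuel m : Nat) (l cur : List Char) (acc : List (List Char)),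
    (PySem.Chars.splitOnMax.go sep fuel m l cur acc).length ≤ acc.length + m + 1 := by
  intro fuel
  induction fuel with
  | zero => intro m l cur acc; simp [PySem.Chars.splitOnMax.go]
  | succ fuel ih =>
    intro m l cur acc
    cases l with
    | nil => simp [PySem.Chars.splitOnMax.go]
    | cons c rest =>
      rw [PySem.Chars.splitOnMax.go]
      by_cases hm : m = 0
      · simp [hm]
      · simp only [hm, if_false]
        by_cases hp : sep.isPrefixOf (c :: rest) = true
        · simp only [hp, if_true]
          calc (PySem.Chars.splitOnMax.go sep fuel (m-1) _ [] (cur.reverse :: acc)).length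
              ≤ (cur.reverse :: acc).length + (m-1) + 1 := ih _ _ _ _
            _ ≤ acc.length + m + 1 := by simp; omega
        · simp only [hp]
          exact ih _ _ _ _

lemma pvSplitMax_len (s : String) (parts : List String)
    (h : PySem.Str.splitMax? s "." 1 = some parts) : parts.length ≤ 2 := by
  simp [PySem.Str.splitMax?, PySem.Chars.splitMax?, PySem.Chars.splitOnMax] at h
  rw [← h]
  simpa using pvGo_len ['.'] (s.length + 1) 1 s.toList [] []

lemma pvParse_fst (e : String) (c : String × String × String) (h : pvParse e = some c) : c.1 = e := by
  unfold pvParse at h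
  cases hs : PySem.Str.splitMax? e "." 1 with
  | none => rw [hs] at h; exact absurd h (by simp)
  | some parts =>
    rw [hs] at h
    simp only [] at h
    by_cases hl : (parts.length == 2) = true
    · rw [if_pos hl] at h
      cases h
      rfl
    · rw [if_neg hl] at h
      exact absurd h (by simp)

-- when pvParse rejects an id, pvKeep rejects it too
lemma pvKeep_of_parse_none (lower und e : String) (h : pvParse e = none) :
    pvKeep lower und e = false := by
  unfold pvParse at h
  unfold pvKeep
  cases hs : PySem.Str.splitMax? e "." 1 with
  | none => rfl
  | some parts =>
    rw [hs] at h
    simp only [] at h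
    by_cases hl : (parts.length == 2) = true
    · rw [if_pos hl] at h; exact absurd h (by simp)
    · have h2 : parts.length < 2 := by
        have := pvSplitMax_len e parts hs
        simp at hl
        omega
      simp [h2]

-- when pvParse accepts, pvKeep is the two substring tests on the record's fragments
lemma pvKeep_of_parse_some (lower und e : String) (c : String × String × String)
    (h : pvParse e = some c) :
    pvKeep lower und e = (PySem.Str.isIn c.2.1 lower || PySem.Str.isIn c.2.2 und) := by
  unfold pvParse at h
  unfold pvKeep
  cases hs : PySem.Str.splitMax? e "." 1 with
  | none => rw [hs] at h; exact absurd h (by simp)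
  | some parts =>
    rw [hs] at h
    simp only [] at h
    by_cases hl : (parts.length == 2) = true
    · rw [if_pos hl] at h
      cases h
      have : ¬ parts.length < 2 := by simp at hl; omega
      simp [this]
    · rw [if_neg hl] at h; exact absurd h (by simp)

-- membership in a fold of Set.add
lemma pvMem_foldl_add {α β : Type} [BEq α] [LawfulBEq α] (g : β → α) (cs : List β)
    (s0 : PySem.Set α) (x : α) :
    x ∈ cs.foldl (fun s c => PySem.Set.add s (g c)) s0 ↔ x ∈ s0 ∨ ∃ c ∈ cs, g c = x := by
  induction cs generalizing s0 with
  | nil => simp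
  | cons c t ih =>
    simp only [List.foldl_cons]
    rw [ih, PySem.Set.mem_add]
    constructor
    · rintro (⟨h | h⟩ | ⟨c', hc', h⟩)
      · exact Or.inl h
      · exact Or.inr ⟨c, List.mem_cons_self, h.symm⟩
      · exact Or.inr ⟨c', List.mem_cons_of_mem _ hc', h⟩
    · rintro (h | ⟨c', hc', h⟩)
      · exact Or.inl (Or.inl h)
      · rcases List.mem_cons.mp hc' with rfl | hm
        · exact Or.inl (Or.inr h.symm)
        · exact Or.inr ⟨c', hm, h⟩

-- membership in the substring index
lemma pvMem_substrings (s : String) (lens : PySem.Set Int) (x : String) :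
    x ∈ pvSubstrings s lens ↔
      ∃ l ∈ lens, ∃ i ∈ PySem.List.pyRange 0 (PySem.Str.len s - l + 1) 1,
        PySem.Str.slice s (some i) (some (i + l)) = x := by
  unfold pvSubstrings
  have hgen : ∀ (ls : List Int) (acc : PySem.Set String),
      x ∈ ls.foldl (fun acc l =>
        (PySem.List.pyRange 0 (PySem.Str.len s - l + 1) 1).foldl (fun acc i =>
          PySem.Set.add acc (PySem.Str.slice s (some i) (some (i + l)))) acc) acc
      ↔ x ∈ acc ∨ ∃ l ∈ ls, ∃ i ∈ PySem.List.pyRange 0 (PySem.Str.len s - l + 1) 1,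
          PySem.Str.slice s (some i) (some (i + l)) = x := by
    intro ls
    induction ls with
    | nil => simp
    | cons l t ih =>
      intro acc
      simp only [List.foldl_cons]
      rw [ih, pvMem_foldl_add]
      constructor
      · rintro (⟨h | ⟨i, hi, h⟩⟩ | ⟨l', hl', h⟩)
        · exact Or.inl h
        · exact Or.inr ⟨l, List.mem_cons_self, i, hi, h⟩
        · exact Or.inr ⟨l', List.mem_cons_of_mem _ hl', h⟩
      · rintro (h | ⟨l', hl', h⟩)
        · exact Or.inl (Or.inl h)
        · rcases List.mem_cons.mp hl' with rfl | hm
          · exact Or.inl (Or.inr h)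
          · exact Or.inr ⟨l', hm, h⟩
  rw [hgen]
  simp [PySem.Set.empty]

-- the substring index of the right lengths answers exactly `x in s`
lemma pvContains_substrings (s x : String) (lens : PySem.Set Int)
    (hlen : ((x.toList.length : Int)) ∈ lens) (hnn : ∀ l ∈ lens, 0 ≤ l) :
    (x ∈ pvSubstrings s lens) ↔ PySem.Str.isIn x s = true := by
  rw [pvMem_substrings, PySem.Str.isIn_eq, PySem.Chars.isIn_iff_infix]
  constructor
  · rintro ⟨l, hl, i, hi, h⟩
    obtain ⟨h0, _⟩ := PySem.List.mem_pyRange_one.mp hi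
    have hlnn := hnn l hl
    have : (PySem.Str.slice s (some i) (some (i + l))).toList
        = (s.toList.drop i.toNat).take ((i + l).toNat - i.toNat) := by
      rw [PySem.Str.toList_slice, PySem.Chars.slice_eq_listSlice,
          PySem.List.slice_toNat s.toList h0 (by omega)]
    rw [← h, this]
    exact ((List.take_prefix _ _).isInfix).trans (List.drop_suffix _ _).isInfix
  · rintro ⟨t₁, t₂, h⟩
    refine ⟨(x.toList.length : Int), hlen, (t₁.length : Int), ?_, ?_⟩
    · refine PySem.List.mem_pyRange_one.mpr ⟨by positivity, ?_⟩
      have hlen_s : s.toList.length = t₁.length + x.toList.length + t₂.length := by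
        rw [← h]; simp; omega
      rw [PySem.Str.len_eq]
      omega
    · apply String.toList_inj.mp
      rw [PySem.Str.toList_slice, PySem.Chars.slice_eq_listSlice,
          PySem.List.slice_natCast_add s.toList t₁.length x.toList.length, ← h]
      simp

-- the filtered id list of A equals B's filtered candidate list projected to ids
lemma pvFilter_bridge (lower und : String) (ids : List String) :
    ids.filter (pvKeep lower und)
      = ((ids.filterMap pvParse).filter (fun c => pvKeep lower und c.1)).map (·.1) := by
  induction ids with
  | nil => simp
  | cons e t ih =>
    simp only [List.filter_cons, List.filterMap_cons]
    cases hp : pvParse e with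
    | none =>
      rw [pvKeep_of_parse_none lower und e hp]
      simpa using ih
    | some c =>
      have hc1 : c.1 = e := pvParse_fst e c hp
      rw [List.filter_cons, hc1]
      by_cases hk : pvKeep lower und e = true
      · simp [hk, ih, hc1]
      · simp only [Bool.not_eq_true] at hk
        simp [hk, ih]

-- ===== VERDICT (by name: the statement is the Claim_ definition above) =====
theorem extract_entities_from_text_py_spec : Claim_equal_extract_entities_from_text_py := by
  intro text ids _
  unfold Spec_extract_entities_from_text_py
  unfold extract_entities_from_text_py extract_entities_from_text_py_alt
  simp only
  rw [pvA_foldl, pvB_candidates]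
  simp only [List.nil_append]
  rw [pvFilter_bridge (PySem.Str.lower text) (PySem.Str.replace (PySem.Str.lower text) " " "_") ids]
  congr 1
  apply List.filter_congr
  intro c hc
  obtain ⟨e, he, hpe⟩ := List.mem_filterMap.mp hc
  have hc1 : c.1 = e := pvParse_fst e c hpe
  rw [hc1, pvKeep_of_parse_some _ _ e c hpe]
  have hnnL : ∀ l ∈ (ids.filterMap pvParse).foldl
      (fun s c => PySem.Set.add s (PySem.Str.len c.2.1)) PySem.Set.empty, 0 ≤ l := by
    intro l hl
    rcases (pvMem_foldl_add _ _ _ _).mp hl with h | ⟨c', _, h⟩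
    · exact absurd h (by simp [PySem.Set.empty])
    · rw [← h, PySem.Str.len_eq]; positivity
  have hnnU : ∀ l ∈ (ids.filterMap pvParse).foldl
      (fun s c => PySem.Set.add s (PySem.Str.len c.2.2)) PySem.Set.empty, 0 ≤ l := by
    intro l hl
    rcases (pvMem_foldl_add _ _ _ _).mp hl with h | ⟨c', _, h⟩
    · exact absurd h (by simp [PySem.Set.empty])
    · rw [← h, PySem.Str.len_eq]; positivity
  have hmemL : ((c.2.1.toList.length : Int)) ∈ (ids.filterMap pvParse).foldl
      (fun s c => PySem.Set.add s (PySem.Str.len c.2.1)) PySem.Set.empty :=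
    (pvMem_foldl_add _ _ _ _).mpr (Or.inr ⟨c, hc, by rw [PySem.Str.len_eq]⟩)
  have hmemU : ((c.2.2.toList.length : Int)) ∈ (ids.filterMap pvParse).foldl
      (fun s c => PySem.Set.add s (PySem.Str.len c.2.2)) PySem.Set.empty :=
    (pvMem_foldl_add _ _ _ _).mpr (Or.inr ⟨c, hc, by rw [PySem.Str.len_eq]⟩)
  have hL := pvContains_substrings (PySem.Str.lower text) c.2.1 _ hmemL hnnL
  have hU := pvContains_substrings (PySem.Str.replace (PySem.Str.lower text) " " "_") c.2.2 _ hmemU hnnU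
  rw [Bool.eq_iff_iff]
  simp only [Bool.or_eq_true]
  rw [← hL, ← hU, PySem.Set.contains_iff, PySem.Set.contains_iff]
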